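-- pv_equiv track=rewrite | github.com/deevidh/aoc-2021 | 2/2.py | part1
-- ===== SOURCE A (Python) =====
-- def part1(course):
--     distance = 0
--     depth = 0
--     for direction, amount in course:
--         if direction == "forward":
--             distance+=amount
--         if direction == "up":
--             depth-=amount
--         if direction == "down":
--             depth+=amount
--     return distance * depth
-- ===== SOURCE B (Python) =====
-- def part1(course):
--     distance = sum(a for d, a in course if d == "forward")
--     depth = (sum(a for d, a in course if d == "down")
--              - sum(a for d, a in course if d == "up"))
--     return distance * depth
-- ===== Notes on version B (the rewrite author's own statement) =====
-- stated objective: alternative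
-- what changed: Replaced the single loop maintaining two running accumulators with three independent filtered sums (forward, down, up) combined at the end.
import Mathlib
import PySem

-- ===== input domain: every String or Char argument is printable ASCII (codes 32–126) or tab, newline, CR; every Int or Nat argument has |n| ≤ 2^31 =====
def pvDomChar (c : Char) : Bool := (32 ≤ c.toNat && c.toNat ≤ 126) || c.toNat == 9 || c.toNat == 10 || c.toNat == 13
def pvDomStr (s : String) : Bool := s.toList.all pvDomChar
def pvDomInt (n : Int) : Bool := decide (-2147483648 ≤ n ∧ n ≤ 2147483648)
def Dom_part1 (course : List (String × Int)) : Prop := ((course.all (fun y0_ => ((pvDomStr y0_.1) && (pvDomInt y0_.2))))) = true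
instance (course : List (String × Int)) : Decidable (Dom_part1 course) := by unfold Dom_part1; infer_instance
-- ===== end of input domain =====

-- B replaces A's single two-accumulator loop with three independent filtered sums; objective: alternative decomposition.

-- ===== PORT A =====
-- literal port of A: one fold carrying (distance, depth), three independent ifs per element
def part1Step (st : Int × Int) (da : String × Int) : Int × Int :=
  let st := if da.1 == "forward" then (st.1 + da.2, st.2) else st
  let st := if da.1 == "up" then (st.1, st.2 - da.2) else st
  let st := if da.1 == "down" then (st.1, st.2 + da.2) else st
  st

def part1 (course : List (String × Int)) : Int :=
  let st := course.foldl part1Step (0, 0)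
  st.1 * st.2

-- ===== PORT B =====
-- literal port of B: three filtered sums
def part1_alt (course : List (String × Int)) : Int :=
  let distance := ((course.filter (fun da => da.1 == "forward")).map Prod.snd).sum
  let depth := ((course.filter (fun da => da.1 == "down")).map Prod.snd).sum
             - ((course.filter (fun da => da.1 == "up")).map Prod.snd).sum
  distance * depth

-- ===== PRECONDITION & SPEC =====
def Spec_part1 (course : List (String × Int)) (out : Int) : Prop := out = part1_alt course
instance (course : List (String × Int)) (out : Int) : Decidable (Spec_part1 course out) := by unfold Spec_part1; infer_instance

-- ===== CLAIM (what is proved, stated in full; the proofs are below) =====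
def Claim_equal_part1 : Prop := ∀ (course : List (String × Int)), Dom_part1 course → Spec_part1 course (part1 course)

-- ===== LEMMAS AND PROOFS =====

-- invariant: the fold from any start equals the start shifted by the three filtered sums
theorem part1_fold_inv (course : List (String × Int)) (d0 p0 : Int) :
    course.foldl part1Step (d0, p0)
    = (d0 + ((course.filter (fun da => da.1 == "forward")).map Prod.snd).sum,
       p0 + ((course.filter (fun da => da.1 == "down")).map Prod.snd).sum
          - ((course.filter (fun da => da.1 == "up")).map Prod.snd).sum) := by
  induction course generalizing d0 p0 with
  | nil => simp
  | cons hd tl ih =>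
    simp only [List.foldl_cons, List.filter_cons]
    by_cases hf : hd.1 == "forward" <;> by_cases hu : hd.1 == "up" <;>
      by_cases hdn : hd.1 == "down" <;>
      simp_all [part1Step] <;> ring

-- ===== VERDICT (by name: the statement is the Claim_ definition above) =====
theorem part1_spec : Claim_equal_part1 := by
  intro course _
  unfold Spec_part1 part1 part1_alt
  simp only [part1_fold_inv]
  simp
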